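-- pv_equiv track=rewrite | github.com/teqas/Deploy1 | wearnext_fastapi_service.py | _map_label_flexible
-- ===== SOURCE A (Python) =====
-- from typing import Any
--
-- def _normalize_label(s: Any) -> str:
--     if not isinstance(s, str):
--         return ""
--     return s.strip().lower().replace("-", " ").replace("_", " ")
--
-- def _map_label_flexible(label: str | None, mapping_dict: dict[str, int]) -> int | None:
--     if not label or not isinstance(label, str):
--         return None
--     target = _normalize_label(label)
--     for k, v in mapping_dict.items():
--         if _normalize_label(k) == target:
--             return v
--     return None
-- ===== SOURCE B (Python) =====
-- def _canon_char(c):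
--     c = c.lower()
--     if c == '-' or c == '_':
--         return ' '
--     return c
--
-- def _matches(k, target):
--     t = k.strip()
--     if len(t) != len(target):
--         return False
--     for i in range(len(target)):
--         if _canon_char(t[i]) != target[i]:
--             return False
--     return True
--
-- def _map_label_flexible(label, mapping_dict):
--     if not label or not isinstance(label, str):
--         return None
--     target = [_canon_char(c) for c in label.strip()]
--     for k, v in mapping_dict.items():
--         if _matches(k, target):
--             return v
--     return None
-- ===== Notes on version B (the rewrite author's own statement) =====
-- stated objective: alternative
-- what changed: B never builds normalized key strings: it canonicalizes the label once into a character sequence, then for each key strips it, prunes by length, and compares character-by-character under a per-character canonicalization (lower, -/_ to space) with early mismatch exit, instead of A's per-key construction of a normalized string via strip/lower/replace/replace and whole-string equality.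
import Mathlib
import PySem

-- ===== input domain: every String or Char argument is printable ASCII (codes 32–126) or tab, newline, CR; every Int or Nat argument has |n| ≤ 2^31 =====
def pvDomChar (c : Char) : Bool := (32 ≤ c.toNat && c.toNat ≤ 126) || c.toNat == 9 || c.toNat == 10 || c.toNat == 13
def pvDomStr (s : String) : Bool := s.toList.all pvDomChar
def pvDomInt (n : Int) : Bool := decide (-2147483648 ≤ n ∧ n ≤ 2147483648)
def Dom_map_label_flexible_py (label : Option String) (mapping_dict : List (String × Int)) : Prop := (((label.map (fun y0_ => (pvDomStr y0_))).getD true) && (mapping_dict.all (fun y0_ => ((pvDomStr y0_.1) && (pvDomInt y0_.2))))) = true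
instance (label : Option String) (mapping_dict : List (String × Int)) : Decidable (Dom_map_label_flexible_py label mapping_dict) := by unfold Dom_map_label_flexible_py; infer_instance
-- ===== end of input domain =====

-- B is an alternative implementation: it never builds normalized key strings — it canonicalizes
-- the label once into a character list, then strips each key, prunes by length and compares
-- character-by-character with early mismatch exit, instead of A's per-key strip/lower/replace/replace
-- string construction plus whole-string equality.

-- ===== PORT A =====
-- Python _normalize_label (for a str argument): s.strip().lower().replace("-", " ").replace("_", " ")
def normalize_label_py (s : String) : String :=
  PySem.Str.replace (PySem.Str.replace (PySem.Str.lower (PySem.Str.strip s)) "-" " ") "_" " "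

-- 'for k, v in mapping_dict.items(): if _normalize_label(k) == target: return v'
def mapScanA (target : String) : List (String × Int) → Option Int
  | [] => none
  | (k, v) :: rest => if normalize_label_py k = target then some v else mapScanA target rest

def map_label_flexible_py (label : Option String) (mapping_dict : List (String × Int)) : Option Int :=
  match label with
  | none => none
  | some s => if s = "" then none else mapScanA (normalize_label_py s) mapping_dict

-- ===== PORT B =====
-- Python _canon_char: lower the character; '-' and '_' become ' '
def canonChar (c : Char) : Char :=
  let l := PySem.Chars.lowerChar c
  if l = '-' then ' ' else if l = '_' then ' ' else l

-- the 'for i in range(len(target)): if _canon_char(t[i]) != target[i]: return False' loop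
def pairsEqB : List Char → List Char → Bool
  | [], [] => true
  | c :: cs, d :: ds => if canonChar c ≠ d then false else pairsEqB cs ds
  | _, _ => false

-- Python _matches: strip the key, prune by length, then compare character-by-character
def matchesB (k : String) (target : List Char) : Bool :=
  let t := PySem.Chars.strip k.toList
  if t.length ≠ target.length then false else pairsEqB t target

-- 'for k, v in mapping_dict.items(): if _matches(k, target): return v'
def scanB (target : List Char) : List (String × Int) → Option Int
  | [] => none
  | (k, v) :: rest => if matchesB k target then some v else scanB target rest

def map_label_flexible_py_alt (label : Option String) (mapping_dict : List (String × Int)) : Option Int :=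
  match label with
  | none => none
  | some s =>
    if s = "" then none
    else scanB ((PySem.Chars.strip s.toList).map canonChar) mapping_dict

-- ===== PRECONDITION & SPEC =====
def Spec_map_label_flexible_py (label : Option String) (mapping_dict : List (String × Int)) (out : Option Int) : Prop := out = map_label_flexible_py_alt label mapping_dict
instance (label : Option String) (mapping_dict : List (String × Int)) (out : Option Int) : Decidable (Spec_map_label_flexible_py label mapping_dict out) := by unfold Spec_map_label_flexible_py; infer_instance

-- ===== CLAIM (what is proved, stated in full; the proofs are below) =====
def Claim_equal_map_label_flexible_py : Prop := ∀ (label : Option String) (mapping_dict : List (String × Int)), Dom_map_label_flexible_py label mapping_dict → Spec_map_label_flexible_py label mapping_dict (map_label_flexible_py label mapping_dict)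

-- ===== LEMMAS AND PROOFS =====

-- replacing a single character is a character map
theorem replace_go_single (o n : Char) (l acc : List Char) (fuel : Nat) (h : l.length ≤ fuel) :
    PySem.Chars.replace.go [o] [n] fuel l acc
      = acc.reverse ++ l.map (fun c => if c = o then n else c) := by
  induction l generalizing fuel acc with
  | nil => cases fuel <;> simp [PySem.Chars.replace.go]
  | cons c t ih =>
    cases fuel with
    | zero => simp at h
    | succ f =>
      simp only [PySem.Chars.replace.go, List.isPrefixOf, Bool.and_true]
      by_cases hc : o = c
      · subst hc
        simp only [beq_self_eq_true, if_pos, List.length_cons] at h ⊢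
        show PySem.Chars.replace.go [o] [n] f (List.drop 1 (o :: t)) ([n].reverse ++ acc) = _
        rw [List.drop_one, List.tail_cons, ih _ _ (by omega)]
        simp
      · have hb : (o == c) = false := by simp [hc]
        simp only [hb, Bool.false_eq_true, if_false, List.length_cons] at h ⊢
        rw [ih _ _ (by omega)]
        simp [Ne.symm hc]

theorem replace_single (o n : Char) (cs : List Char) :
    PySem.Chars.replace cs [o] [n] = cs.map (fun c => if c = o then n else c) := by
  simp [PySem.Chars.replace, replace_go_single o n cs [] cs.length le_rfl]

-- A's normalized string, read as a character list, is B's canonical map of the stripped list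
theorem norm_toList (s : String) :
    (normalize_label_py s).toList = (PySem.Chars.strip s.toList).map canonChar := by
  have h1 : ("-" : String).toList = ['-'] := rfl
  have h2 : ("_" : String).toList = ['_'] := rfl
  have h3 : (" " : String).toList = [' '] := rfl
  simp only [normalize_label_py, PySem.Str.toList_replace, PySem.Str.toList_lower,
    PySem.Str.toList_strip, h1, h2, h3, replace_single, PySem.Chars.lower, List.map_map]
  refine List.map_congr_left fun c _ => ?_
  simp only [Function.comp, canonChar]
  by_cases hd : PySem.Chars.lowerChar c = '-' <;> by_cases hu : PySem.Chars.lowerChar c = '_' <;>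
    simp [hd, hu]

-- the positional comparison succeeds exactly when the canonical map of cs is ds
theorem pairsEqB_iff (cs ds : List Char) : pairsEqB cs ds = true ↔ cs.map canonChar = ds := by
  induction cs generalizing ds with
  | nil => cases ds <;> simp [pairsEqB]
  | cons c t ih =>
    cases ds with
    | nil => simp [pairsEqB]
    | cons d es =>
      by_cases h : canonChar c = d
      · simp [pairsEqB, h, ih]
      · simp [pairsEqB, h]

-- B's matcher decides exactly A's normalized-string equality
theorem matchesB_iff (k : String) (target : List Char) :
    matchesB k target = true ↔ (PySem.Chars.strip k.toList).map canonChar = target := by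
  unfold matchesB
  by_cases h : (PySem.Chars.strip k.toList).length = target.length
  · simp only [h, ne_eq, not_true_eq_false, if_false, pairsEqB_iff]
  · have : (PySem.Chars.strip k.toList).map canonChar ≠ target := by
      intro he
      exact h (by simpa using congrArg List.length he)
    simp [h, this]

theorem scan_eq (s : String) (md : List (String × Int)) :
    mapScanA (normalize_label_py s) md = scanB ((PySem.Chars.strip s.toList).map canonChar) md := by
  induction md with
  | nil => rfl
  | cons kv rest ih =>
    obtain ⟨k, v⟩ := kv
    have hiff : (normalize_label_py k = normalize_label_py s)
        ↔ matchesB k ((PySem.Chars.strip s.toList).map canonChar) = true := by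
      rw [matchesB_iff, ← norm_toList s, ← norm_toList k, String.toList_inj]
    simp only [mapScanA, scanB]
    by_cases h : normalize_label_py k = normalize_label_py s
    · rw [if_pos h, if_pos (hiff.mp h)]
    · rw [if_neg h, if_neg (fun hb => h (hiff.mpr hb)), ih]

-- ===== VERDICT (by name: the statement is the Claim_ definition above) =====
theorem map_label_flexible_py_spec : Claim_equal_map_label_flexible_py := by
  intro label md _
  unfold Spec_map_label_flexible_py map_label_flexible_py map_label_flexible_py_alt
  cases label with
  | none => rfl
  | some s =>
    by_cases h : s = ""
    · simp [h]
    · simp [h, scan_eq]
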